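-- pv_equiv track=rewrite | github.com/nicolasbrailo/zmw | zmw_text_to_speech/training/split_audio.py | split_at_silences
-- ===== SOURCE A (Python) =====
-- def split_at_silences(samples, sr, silence_regions):
--     """Split audio at the midpoints of silence regions.
--
--     Returns list of (start_sample, end_sample) for each chunk.
--     """
--     if not silence_regions:
--         return [(0, len(samples))]
--
--     cuts = []
--     for start, end in silence_regions:
--         mid = (start + end) // 2
--         cuts.append(mid)
--
--     chunks = []
--     prev = 0
--     for cut in cuts:
--         if cut > prev:
--             chunks.append((prev, cut))
--         prev = cut
--     if prev < len(samples):
--         chunks.append((prev, len(samples)))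
--
--     return chunks
-- ===== SOURCE B (Python) =====
-- def split_at_silences(samples, sr, silence_regions):
--     """Split audio at the midpoints of silence regions.
--
--     Returns list of (start_sample, end_sample) for each chunk.
--     """
--     if not silence_regions:
--         return [(0, len(samples))]
--     n = len(samples)
--
--     def chunks_from(prev, regions):
--         if not regions:
--             return [(prev, n)] if prev < n else []
--         s, e = regions[0]
--         mid = (s + e) // 2
--         tail = chunks_from(mid, regions[1:])
--         return [(prev, mid)] + tail if mid > prev else tail
--
--     return chunks_from(0, silence_regions)
-- ===== Notes on version B (the rewrite author's own statement) =====
-- stated objective: alternative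
-- what changed: Replaces A's two staged loops (first materialising a cuts list, then a running-prev accumulator loop with a trailing special case) by a single recursive pass over the regions that computes each midpoint on the fly and builds the chunk list by cons while unwinding, the tail chunk emitted at the recursion base.
import Mathlib
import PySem

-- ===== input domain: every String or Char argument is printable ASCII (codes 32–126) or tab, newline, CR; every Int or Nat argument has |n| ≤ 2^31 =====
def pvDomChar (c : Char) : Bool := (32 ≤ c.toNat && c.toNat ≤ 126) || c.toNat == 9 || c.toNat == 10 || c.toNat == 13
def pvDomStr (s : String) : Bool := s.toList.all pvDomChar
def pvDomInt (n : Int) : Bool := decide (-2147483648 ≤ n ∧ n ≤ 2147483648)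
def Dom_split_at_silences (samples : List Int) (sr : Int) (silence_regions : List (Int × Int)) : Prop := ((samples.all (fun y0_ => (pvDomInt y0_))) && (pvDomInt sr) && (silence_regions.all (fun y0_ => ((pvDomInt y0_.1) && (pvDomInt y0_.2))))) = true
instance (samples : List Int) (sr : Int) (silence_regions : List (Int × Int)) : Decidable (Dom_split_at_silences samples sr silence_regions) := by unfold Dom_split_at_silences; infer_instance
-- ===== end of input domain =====

-- B replaces A's two staged loops (cuts list, then running-prev accumulator loop plus
-- trailing special case) by one recursive pass over the regions building chunks by cons.

-- ===== PORT A =====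
def split_at_silences (samples : List Int) (sr : Int) (silence_regions : List (Int × Int)) : List (Int × Int) :=
  if silence_regions = [] then [(0, (samples.length : Int))]
  else
    -- cuts: append each midpoint in turn
    let cuts : List Int :=
      silence_regions.foldl (fun acc p => acc ++ [PySem.Int.floordiv (p.1 + p.2) 2]) []
    -- chunks loop: state is (chunks, prev)
    let st : List (Int × Int) × Int :=
      cuts.foldl (fun st cut =>
        (if cut > st.2 then st.1 ++ [(st.2, cut)] else st.1, cut)) ([], 0)
    if st.2 < (samples.length : Int) then st.1 ++ [(st.2, (samples.length : Int))] else st.1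

-- ===== PORT B =====
-- recursive helper: chunks_from(prev, regions) in Source B
def chunksFrom (n : Int) (prev : Int) : List (Int × Int) → List (Int × Int)
  | [] => if prev < n then [(prev, n)] else []
  | p :: rest =>
    let mid := PySem.Int.floordiv (p.1 + p.2) 2
    let tail := chunksFrom n mid rest
    if mid > prev then (prev, mid) :: tail else tail

def split_at_silences_alt (samples : List Int) (sr : Int) (silence_regions : List (Int × Int)) : List (Int × Int) :=
  if silence_regions = [] then [(0, (samples.length : Int))]
  else chunksFrom (samples.length : Int) 0 silence_regions

-- ===== PRECONDITION & SPEC =====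
def Spec_split_at_silences (samples : List Int) (sr : Int) (silence_regions : List (Int × Int)) (out : List (Int × Int)) : Prop := out = split_at_silences_alt samples sr silence_regions
instance (samples : List Int) (sr : Int) (silence_regions : List (Int × Int)) (out : List (Int × Int)) : Decidable (Spec_split_at_silences samples sr silence_regions out) := by unfold Spec_split_at_silences; infer_instance

-- ===== CLAIM (what is proved, stated in full; the proofs are below) =====
def Claim_equal_split_at_silences : Prop := ∀ (samples : List Int) (sr : Int) (silence_regions : List (Int × Int)), Dom_split_at_silences samples sr silence_regions → Spec_split_at_silences samples sr silence_regions (split_at_silences samples sr silence_regions)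

-- ===== LEMMAS AND PROOFS =====

-- A's cuts-building foldl is the map of midpoints.
theorem cuts_eq_map (f : Int × Int → Int) :
    ∀ (rs : List (Int × Int)) (acc : List Int),
      rs.foldl (fun acc p => acc ++ [f p]) acc = acc ++ rs.map f := by
  intro rs
  induction rs with
  | nil => simp
  | cons r rs ih => intro acc; simp [List.foldl, ih]

-- Loop invariant: A's chunks loop over the midpoint list, plus the trailing special
-- case, equals acc ++ B's recursive chunksFrom over the regions themselves.
theorem loop_eq_chunksFrom (n : Int) :
    ∀ (rs : List (Int × Int)) (acc : List (Int × Int)) (prev : Int),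
      (let st := (rs.map (fun p => PySem.Int.floordiv (p.1 + p.2) 2)).foldl
          (fun st cut => (if cut > st.2 then st.1 ++ [(st.2, cut)] else st.1, cut)) (acc, prev)
       if st.2 < n then st.1 ++ [(st.2, n)] else st.1)
      = acc ++ chunksFrom n prev rs := by
  intro rs
  induction rs with
  | nil =>
      intro acc prev
      by_cases h : prev < n <;> simp [chunksFrom, h]
  | cons r rest ih =>
      intro acc prev
      simp only [List.map_cons, List.foldl_cons]
      rw [ih]
      simp only [chunksFrom]
      split_ifs <;> simp

-- ===== VERDICT (by name: the statement is the Claim_ definition above) =====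
theorem split_at_silences_spec : Claim_equal_split_at_silences := by
  intro samples sr rs _
  unfold Spec_split_at_silences split_at_silences split_at_silences_alt
  by_cases hrs : rs = []
  · simp [hrs]
  · simp only [hrs, if_false]
    rw [cuts_eq_map]
    simpa using loop_eq_chunksFrom (samples.length : Int) rs [] 0
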